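-- pv_equiv track=rewrite | github.com/ZdotAxiom/Zdot | run_vnext_with_seed_v5.py | banned_tokens_ngram
-- ===== SOURCE A (Python) =====
-- def banned_tokens_ngram(input_ids_1d, n: int):
--     """
--     Standard token-level n-gram blocking:
--       If the last (n-1) tokens have appeared before, ban any token that would
--       recreate an n-gram already seen.
--     """
--     if n <= 1:
--         return set()
--     ids = list(map(int, input_ids_1d))
--     if len(ids) < (n - 1) + 1:
--         return set()
--
--     # build map: prefix(n-1) -> set(next_token)
--     prefix_to_next = {}
--     for i in range(len(ids) - n + 1):
--         prefix = tuple(ids[i:i + n - 1])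
--         nxt = ids[i + n - 1]
--         if prefix not in prefix_to_next:
--             prefix_to_next[prefix] = set()
--         prefix_to_next[prefix].add(nxt)
--
--     cur_prefix = tuple(ids[-(n - 1):])
--     return prefix_to_next.get(cur_prefix, set())
-- ===== SOURCE B (Python) =====
-- def banned_tokens_ngram(input_ids_1d, n: int):
--     # Rolling-window single pass: slide a window of the last n-1 tokens through
--     # the sequence and collect the follower whenever it equals the current
--     # suffix; no prefix->next-set dict over all windows is built.
--     if n <= 1:
--         return set()
--     ids = [int(x) for x in input_ids_1d]
--     if len(ids) < n:
--         return set()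
--     m = n - 1
--     cur = ids[-m:]
--     out = set()
--     win = ids[:m]
--     for t in ids[m:]:
--         if win == cur:
--             out.add(t)
--         win = win[1:]
--         win.append(t)
--     return out
-- ===== Notes on version B (the rewrite author's own statement) =====
-- stated objective: alternative
-- what changed: B replaces A's staged build of a prefix->next-token-set dict over all windows (tuple slicing, hashing and dict bookkeeping per position) followed by a lookup with a single rolling-window pass: the window of the last n-1 tokens is slid one token at a time and the follower is collected whenever the window equals the current suffix.
import Mathlib
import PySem

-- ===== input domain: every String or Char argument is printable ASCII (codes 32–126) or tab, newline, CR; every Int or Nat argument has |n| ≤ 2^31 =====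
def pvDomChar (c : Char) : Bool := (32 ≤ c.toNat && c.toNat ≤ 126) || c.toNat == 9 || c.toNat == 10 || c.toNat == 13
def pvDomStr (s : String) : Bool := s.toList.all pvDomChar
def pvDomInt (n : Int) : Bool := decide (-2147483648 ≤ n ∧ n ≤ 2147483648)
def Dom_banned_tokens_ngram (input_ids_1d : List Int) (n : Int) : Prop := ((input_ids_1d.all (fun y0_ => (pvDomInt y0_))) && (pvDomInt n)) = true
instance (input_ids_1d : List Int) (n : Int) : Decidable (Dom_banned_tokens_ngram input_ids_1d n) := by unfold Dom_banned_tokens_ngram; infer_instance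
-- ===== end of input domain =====

-- B replaces A's prefix->next-set dict over all windows by a single rolling-window pass
-- (the window of the last n-1 tokens is slid along, followers of windows equal to the
-- current suffix are collected); return value proved equal.

-- ===== PORT A =====
def banned_tokens_ngram (input_ids_1d : List Int) (n : Int) : List Int :=
  if n ≤ 1 then [] else
  if ((input_ids_1d.map (fun x => x)).length : Int) < (n - 1) + 1 then [] else
  ((PySem.List.pyRange 0 (((input_ids_1d.map (fun x => x)).length : Int) - n + 1) 1).foldl
    (fun d i =>
      let pfx := PySem.List.slice (input_ids_1d.map (fun x => x)) (some i) (some (i + n - 1))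
      let nxt := PySem.List.pyGetD (input_ids_1d.map (fun x => x)) (i + n - 1) 0
      let d := if d.contains pfx then d else d.insert pfx PySem.Set.empty
      d.insert pfx (PySem.Set.add (d.getD pfx PySem.Set.empty) nxt))
    PySem.Dict.empty).getD
    (PySem.List.slice (input_ids_1d.map (fun x => x)) (some (-(n - 1))) none) PySem.Set.empty

-- ===== PORT B =====
def banned_tokens_ngram_alt (input_ids_1d : List Int) (n : Int) : List Int :=
  if n ≤ 1 then [] else
  if ((input_ids_1d.map (fun x => x)).length : Int) < n then [] else
  let ids := input_ids_1d.map (fun x => x)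
  let cur := PySem.List.slice ids (some (-(n - 1))) none
  ((PySem.List.slice ids (some (n - 1)) none).foldl
      (fun (st : List Int × PySem.Set Int) t =>
        (PySem.List.slice st.1 (some 1) none ++ [t],
         if st.1 == cur then PySem.Set.add st.2 t else st.2))
      (PySem.List.slice ids none (some (n - 1)), PySem.Set.empty)).2

-- ===== PRECONDITION & SPEC =====
def Spec_banned_tokens_ngram (input_ids_1d : List Int) (n : Int) (out : List Int) : Prop := out = banned_tokens_ngram_alt input_ids_1d n
instance (input_ids_1d : List Int) (n : Int) (out : List Int) : Decidable (Spec_banned_tokens_ngram input_ids_1d n out) := by unfold Spec_banned_tokens_ngram; infer_instance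

-- ===== CLAIM (what is proved, stated in full; the proofs are below) =====
def Claim_equal_banned_tokens_ngram : Prop := ∀ (input_ids_1d : List Int) (n : Int), Dom_banned_tokens_ngram input_ids_1d n → Spec_banned_tokens_ngram input_ids_1d n (banned_tokens_ngram input_ids_1d n)

-- ===== LEMMAS AND PROOFS =====

-- getD at a fixed key through one step of A's dict-building loop
theorem pv_step_getD (d : PySem.Dict (List Int) (PySem.Set Int)) (pfx cur : List Int) (nxt : Int) :
    (let d' := if d.contains pfx then d else d.insert pfx PySem.Set.empty
     d'.insert pfx (PySem.Set.add (d'.getD pfx PySem.Set.empty) nxt)).getD cur PySem.Set.empty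
    = (if pfx == cur then PySem.Set.add (d.getD cur PySem.Set.empty) nxt
       else d.getD cur PySem.Set.empty) := by
  by_cases h : pfx = cur
  · subst h
    by_cases hc : d.contains pfx
    · simp [hc, PySem.Dict.getD_insert_self]
    · have hcf : d.contains pfx = false := by simpa using hc
      simp [hcf, PySem.Dict.getD_insert_self,
        PySem.Dict.getD_of_not_contains d ([] : PySem.Set Int) hcf]
  · have hne : cur ≠ pfx := Ne.symm h
    by_cases hc : d.contains pfx
    · simp [hc, h, PySem.Dict.getD_insert_of_ne _ _ _ hne]
    · simp [hc, h, PySem.Dict.getD_insert_of_ne _ _ _ hne]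

-- the dict lookup at `cur` after A's loop equals a direct index-fold accumulation
theorem pv_fold_getD (ids : List Int) (n : Int) (cur : List Int)
    (l : List Int) (d : PySem.Dict (List Int) (PySem.Set Int)) (out : PySem.Set Int)
    (h : d.getD cur PySem.Set.empty = out) :
    (l.foldl (fun d i =>
        let pfx := PySem.List.slice ids (some i) (some (i + n - 1))
        let nxt := PySem.List.pyGetD ids (i + n - 1) 0
        let d := if d.contains pfx then d else d.insert pfx PySem.Set.empty
        d.insert pfx (PySem.Set.add (d.getD pfx PySem.Set.empty) nxt)) d).getD cur PySem.Set.empty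
    = l.foldl (fun out i =>
        if PySem.List.slice ids (some i) (some (i + (n - 1))) == cur then
          PySem.Set.add out (PySem.List.pyGetD ids (i + (n - 1)) 0)
        else out) out := by
  induction l generalizing d out with
  | nil => simpa using h
  | cons i l ih =>
    simp only [List.foldl_cons]
    apply ih
    rw [pv_step_getD]
    have harg : i + n - 1 = i + (n - 1) := by ring
    rw [harg, h]

-- sliding the window one step: drop the head, append the next element
theorem pv_slide (ids : List Int) (k M : Nat) (hM : 1 ≤ M) (h : k + M < ids.length) :
    ((ids.drop k).take M).tail ++ [ids[k + M]] = (ids.drop (k + 1)).take M := by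
  obtain ⟨P, rfl⟩ : ∃ P, M = P + 1 := ⟨M - 1, by omega⟩
  have h1 : ((ids.drop k).take (P + 1)).tail = (ids.drop (k + 1)).take P := by
    rw [← List.drop_one, List.drop_take, List.drop_drop]
    simp
  have h2 : (ids.drop (k + 1))[P]? = some ids[k + (P + 1)] := by
    have hidx : k + 1 + P = k + (P + 1) := by omega
    rw [List.getElem?_drop, List.getElem?_eq_getElem (by omega : k + 1 + P < ids.length)]
    simp [hidx]
  rw [h1, List.take_add_one, h2]
  rfl

-- the rolling-window fold of B equals the index fold over window starts
theorem pv_roll (ids cur : List Int) (M : Nat) (hM : 1 ≤ M) (c : Nat) :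
    ∀ (k : Nat) (out : PySem.Set Int), ids.length = k + M + c →
    ((ids.drop (k + M)).foldl
        (fun (st : List Int × PySem.Set Int) t =>
          (st.1.tail ++ [t], if st.1 == cur then PySem.Set.add st.2 t else st.2))
        ((ids.drop k).take M, out)).2
    = (List.range' k c).foldl
        (fun out j => if (ids.drop j).take M == cur then
            PySem.Set.add out (ids.getD (j + M) 0) else out) out := by
  induction c with
  | zero =>
    intro k out hlen
    have hd : ids.drop (k + M) = [] := List.drop_eq_nil_of_le (by omega)
    rw [hd]
    simp
  | succ c ih =>
    intro k out hlen
    have hlt : k + M < ids.length := by omega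
    rw [List.drop_eq_getElem_cons hlt, List.foldl_cons, List.range'_succ, List.foldl_cons]
    dsimp only
    rw [pv_slide ids k M hM hlt, List.getD_eq_getElem ids 0 hlt,
        show k + M + 1 = (k + 1) + M by omega]
    exact ih (k + 1) _ (by omega)

-- ===== VERDICT (by name: the statement is the Claim_ definition above) =====
theorem banned_tokens_ngram_spec : Claim_equal_banned_tokens_ngram := by
  unfold Claim_equal_banned_tokens_ngram
  intro xs n _
  unfold Spec_banned_tokens_ngram banned_tokens_ngram banned_tokens_ngram_alt
  by_cases h1 : n ≤ 1
  · rw [if_pos h1, if_pos h1]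
  · rw [if_neg h1, if_neg h1]
    by_cases h2 : ((xs.map (fun x => x)).length : Int) < n
    · rw [if_pos (show ((xs.map (fun x => x)).length : Int) < (n - 1) + 1 by omega), if_pos h2]
    · rw [if_neg (show ¬ ((xs.map (fun x => x)).length : Int) < (n - 1) + 1 by omega), if_neg h2]
      simp only []
      set ids := xs.map (fun x => x) with hids
      set cur := PySem.List.slice ids (some (-(n - 1))) none with hcur
      -- A's side: dict lookup = index fold
      rw [show ((ids.length : Int) - n + 1) = (ids.length : Int) - (n - 1) from by ring]
      rw [pv_fold_getD ids n cur _ PySem.Dict.empty PySem.Set.empty (by simp)]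
      -- switch to Nat forms
      obtain ⟨M, hM1, hMn⟩ : ∃ M : Nat, 1 ≤ M ∧ n - 1 = (M : Int) := by
        refine ⟨(n - 1).toNat, by omega, by omega⟩
      have hlen : M < ids.length := by
        have : (ids.length : Int) ≥ n := by omega
        omega
      rw [hMn]
      rw [show ((ids.length : Int) - (M : Int)) = ((ids.length - M : Nat) : Int) by
        push_cast [Nat.cast_sub (le_of_lt hlen)]; ring]
      rw [PySem.List.pyRange_zero_natCast]
      rw [List.foldl_map]
      simp only [← Nat.cast_add, PySem.List.pyGetD_natCast, PySem.List.slice_natCast,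
        Nat.add_sub_cancel_left]
      -- B's side: rolling fold = index fold
      rw [PySem.List.slice_from_natCast, PySem.List.slice_to_natCast]
      simp only [PySem.List.slice_from_one]
      rw [show ids.take M = (ids.drop 0).take M by rw [List.drop_zero],
          show ids.drop M = ids.drop (0 + M) by rw [Nat.zero_add]]
      rw [pv_roll ids cur M hM1 (ids.length - M) 0 PySem.Set.empty (by omega)]
      rw [List.range_eq_range']
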